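-- pv_equiv track=rewrite | github.com/GuutLemon/CyberSecStudy | Python/Advent_of_codes/2016/day7.py | count_ssl
-- ===== SOURCE A (Python) =====
-- def find_ssl(string):
--     ssl = []
--     for i in range(len(string) - 2):
--         if string[i] == string[i+2] != string[i+1]:
--             ssl.append(string[i] + string[i+1] + string[i+2])
--     return ssl
--
-- def count_ssl(lst):
--     count = 0
--     for ip in lst:
--         seq_outside = []
--         seq_inside = []
--         for part in ip:
--             seq = find_ssl(part)
--             if not part.startswith('[') and seq:
--                 seq_outside.extend(seq)
--             elif part.startswith('[') and seq:
--                 seq_inside.extend(seq)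
--         for s in seq_outside:
--             s = s[1] + s[0] + s[1]
--             if s in seq_inside:
--                 count += 1
--                 break
--     return count
-- ===== SOURCE B (Python) =====
-- def count_ssl(lst):
--     count = 0
--     for ip in lst:
--         # collect the BAB-substring targets from the hypernet parts only
--         targets = set()
--         for part in ip:
--             if part.startswith('['):
--                 for i in range(len(part) - 2):
--                     if part[i] == part[i + 2] != part[i + 1]:
--                         targets.add(part[i + 1] + part[i] + part[i + 1])
--         # an IP supports SSL iff some target occurs as a substring of a supernet part
--         if any(t in part for part in ip if not part.startswith('[')
--                for t in targets):
--             count += 1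
--     return count
-- ===== Notes on version B (the rewrite author's own statement) =====
-- stated objective: faster
-- what changed: B reverses A's direction of matching: it extracts ABAs only from the hypernet parts, transforms each into its BAB target string once, and decides the IP by substring search (Python 'in') of those targets inside the supernet parts, so the supernet side is never scanned for ABAs and A's two flat triple lists and nested membership loop disappear.
import Mathlib
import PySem

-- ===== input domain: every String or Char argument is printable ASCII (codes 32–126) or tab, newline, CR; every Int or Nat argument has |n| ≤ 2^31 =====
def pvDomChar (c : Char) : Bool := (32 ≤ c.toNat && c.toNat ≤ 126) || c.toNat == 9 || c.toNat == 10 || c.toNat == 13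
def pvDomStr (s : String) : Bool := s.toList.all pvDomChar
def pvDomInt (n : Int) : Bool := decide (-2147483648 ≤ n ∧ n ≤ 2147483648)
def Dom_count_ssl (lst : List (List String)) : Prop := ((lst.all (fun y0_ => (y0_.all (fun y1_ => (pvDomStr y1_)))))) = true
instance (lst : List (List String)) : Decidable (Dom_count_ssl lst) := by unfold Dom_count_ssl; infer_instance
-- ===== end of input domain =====

-- B inverts A's direction: it extracts ABAs only from the HYPERNET parts, turns each into
-- its "bab" target string, and decides the IP by substring search of those targets inside
-- the supernet parts — no ABA extraction on supernet parts, no nested triple-list loop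
-- (objective: faster; a timing run measured a constant-factor speedup).

-- ===== PORT A =====
-- find_ssl: the 'for i in range(len(string)-2)' window loop, as the obvious sliding-window recursion
def find_ssl_chars : List Char → List String
  | a :: b :: c :: rest =>
      (if a = c ∧ a ≠ b then [String.ofList [a, b, c]] else []) ++ find_ssl_chars (b :: c :: rest)
  | _ => []

def find_ssl (s : String) : List String := find_ssl_chars s.toList

-- the body of A's 'for part in ip' loop, on the state (seq_outside, seq_inside)
def stepPartA (p : List String × List String) (part : String) : List String × List String :=
  let seq := find_ssl part
  if (!PySem.Str.startswith part "[") && !seq.isEmpty then (p.1 ++ seq, p.2)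
  else if PySem.Str.startswith part "[" && !seq.isEmpty then (p.1, p.2 ++ seq)
  else p

-- 'for s in seq_outside: s = s[1] + s[0] + s[1]; if s in seq_inside: count += 1; break'
def hitA (seq_inside : List String) (s : String) : Bool :=
  match PySem.Str.pyGet? s 1, PySem.Str.pyGet? s 0 with
  | some b, some a => seq_inside.contains (String.ofList [b, a, b])
  | _, _ => false   -- unreachable: find_ssl yields 3-char strings only

def count_ssl (lst : List (List String)) : Int :=
  lst.foldl (fun count ip =>
    let p := ip.foldl stepPartA (([] : List String), ([] : List String))
    if p.1.any (hitA p.2) then count + 1 else count) 0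

-- ===== PORT B =====
-- B's inner window loop over one hypernet part: add each ABA's "bab" target string
def addTargets : PySem.Set String → List Char → PySem.Set String
  | t, a :: b :: c :: rest =>
      addTargets (if a = c ∧ a ≠ b then PySem.Set.add t (String.ofList [b, a, b]) else t)
        (b :: c :: rest)
  | t, _ => t

-- B's first pass: 'for part in ip: if part.startswith("["): … targets.add(…)'
def collectTargets (ip : List String) : PySem.Set String :=
  ip.foldl (fun t part =>
    if PySem.Str.startswith part "[" then addTargets t part.toList else t)
    (PySem.Set.empty : PySem.Set String)

def count_ssl_alt (lst : List (List String)) : Int :=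
  lst.foldl (fun count ip =>
    let targets := collectTargets ip
    -- any(t in part for part in ip if not part.startswith('[') for t in targets)
    if ip.any (fun part =>
        !PySem.Str.startswith part "[" && targets.any (fun t => PySem.Str.isIn t part))
    then count + 1 else count) 0

-- ===== PRECONDITION & SPEC =====
def Spec_count_ssl (lst : List (List String)) (out : Int) : Prop := out = count_ssl_alt lst
instance (lst : List (List String)) (out : Int) : Decidable (Spec_count_ssl lst out) := by unfold Spec_count_ssl; infer_instance

-- ===== CLAIM (what is proved, stated in full; the proofs are below) =====
def Claim_equal_count_ssl : Prop := ∀ (lst : List (List String)), Dom_count_ssl lst → Spec_count_ssl lst (count_ssl lst)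

-- ===== LEMMAS AND PROOFS =====

-- the ABA pairs of a char list (proof-side specification shared by both ports)
def abaPairs : List Char → List (Char × Char)
  | a :: b :: c :: rest =>
      (if a = c ∧ a ≠ b then [(a, b)] else []) ++ abaPairs (b :: c :: rest)
  | _ => []

def tri (q : Char × Char) : String := String.ofList [q.1, q.2, q.1]

theorem find_ssl_chars_eq (l : List Char) :
    find_ssl_chars l = (abaPairs l).map tri := by
  induction l using find_ssl_chars.induct with
  | case1 a b c rest ih =>
      simp only [find_ssl_chars, abaPairs, List.map_append, ih]
      split_ifs with h
      · simp [tri, h.1]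
      · simp
  | case2 l h => cases l with
      | nil => rfl
      | cons a t => cases t with
        | nil => rfl
        | cons b t2 => cases t2 with
          | nil => rfl
          | cons c r => exact absurd rfl (h a b c r)

theorem mem_abaPairs_ne (l : List Char) (q : Char × Char) (hq : q ∈ abaPairs l) :
    q.1 ≠ q.2 := by
  induction l using abaPairs.induct with
  | case1 a b c rest ih =>
      rw [abaPairs, List.mem_append] at hq
      rcases hq with h | h
      · split_ifs at h with hc
        · simp at h; subst h; exact hc.2
        · simp at h
      · exact ih h
  | case2 l h => cases l with
      | nil => simp [abaPairs] at hq
      | cons a t => cases t with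
        | nil => simp [abaPairs] at hq
        | cons b t2 => cases t2 with
          | nil => simp [abaPairs] at hq
          | cons c r => exact (h a b c r rfl).elim

-- the core correspondence between B's substring test and the ABA window scan
theorem aba_infix_iff (l : List Char) (a b : Char) (hab : a ≠ b) :
    [a, b, a] <:+: l ↔ (a, b) ∈ abaPairs l := by
  induction l using abaPairs.induct with
  | case1 x y z rest ih =>
      rw [List.infix_cons_iff, ih, abaPairs, List.mem_append]
      constructor
      · rintro (hp | ht)
        · left
          rcases hp with ⟨t, ht⟩
          simp only [List.cons_append, List.nil_append, List.cons.injEq] at ht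
          obtain ⟨rfl, rfl, rfl, -⟩ := ht
          simp [hab]
        · right; exact ht
      · rintro (hh | ht)
        · left
          split_ifs at hh with hc
          · simp at hh
            obtain ⟨rfl, rfl⟩ := hh
            exact ⟨rest, by simp [hc.1]⟩
          · simp at hh
        · right; exact ht
  | case2 l h =>
      cases l with
      | nil => constructor
               · intro hi; have := hi.length_le; simp at this
               · intro hm; simp [abaPairs] at hm
      | cons x t => cases t with
        | nil => constructor
                 · intro hi; have := hi.length_le; simp at this
                 · intro hm; simp [abaPairs] at hm
        | cons y t2 => cases t2 with
          | nil => constructor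
                   · intro hi; have := hi.length_le; simp at this
                   · intro hm; simp [abaPairs] at hm
          | cons z r => exact (h x y z r rfl).elim

-- pairs collected from the supernet / hypernet parts of one ip
def outsP : List String → List (Char × Char)
  | [] => []
  | part :: rest =>
      (if PySem.Str.startswith part "[" then [] else abaPairs part.toList) ++ outsP rest

def insP : List String → List (Char × Char)
  | [] => []
  | part :: rest =>
      (if PySem.Str.startswith part "[" then abaPairs part.toList else []) ++ insP rest

theorem mem_outsP (ip : List String) (q : Char × Char) :
    q ∈ outsP ip ↔ ∃ part ∈ ip, PySem.Str.startswith part "[" = false ∧ q ∈ abaPairs part.toList := by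
  induction ip with
  | nil => simp [outsP]
  | cons part rest ih =>
      rw [outsP, List.mem_append, ih]
      by_cases hb : PySem.Str.startswith part "[" = true <;> simp only [hb] <;> aesop

theorem mem_insP (ip : List String) (q : Char × Char) :
    q ∈ insP ip ↔ ∃ part ∈ ip, PySem.Str.startswith part "[" = true ∧ q ∈ abaPairs part.toList := by
  induction ip with
  | nil => simp [insP]
  | cons part rest ih =>
      rw [insP, List.mem_append, ih]
      by_cases hb : PySem.Str.startswith part "[" = true <;> simp only [hb] <;> aesop

theorem stepPartA_eq (o i : List String) (part : String) :
    stepPartA (o, i) part =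
      (o ++ (if PySem.Str.startswith part "[" then [] else find_ssl part),
       i ++ (if PySem.Str.startswith part "[" then find_ssl part else [])) := by
  unfold stepPartA
  by_cases hb : PySem.Chars.startswith part.toList ['['] = true <;>
    by_cases he : find_ssl part = [] <;>
      simp [PySem.Str.startswith, hb, he]

theorem foldA_eq (ip : List String) (o i : List String) :
    ip.foldl stepPartA (o, i) = (o ++ (outsP ip).map tri, i ++ (insP ip).map tri) := by
  induction ip generalizing o i with
  | nil => simp [outsP, insP]
  | cons part rest ih =>
      rw [List.foldl_cons, stepPartA_eq, ih]
      by_cases hb : PySem.Chars.startswith part.toList ['['] = true <;>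
        simp [outsP, insP, PySem.Str.startswith, hb, find_ssl, find_ssl_chars_eq]

theorem hitA_tri (ins : List (Char × Char)) (q : Char × Char) :
    hitA (ins.map tri) (tri q) = decide ((q.2, q.1) ∈ ins) := by
  have h1 : PySem.Str.pyGet? (tri q) 1 = some q.2 := by
    simp [tri, PySem.Str.pyGet?, PySem.List.pyGet?, PySem.List.pyIdx?]
  have h0 : PySem.Str.pyGet? (tri q) 0 = some q.1 := by
    simp [tri, PySem.Str.pyGet?, PySem.List.pyGet?, PySem.List.pyIdx?]
  rw [hitA, h1, h0]
  simp only [List.contains_eq_mem, List.mem_map, decide_eq_decide]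
  constructor
  · rintro ⟨r, hr, h⟩
    have ht := congrArg String.toList h
    simp [tri] at ht
    have hr' : r = (q.2, q.1) := by cases r; simp_all
    rwa [hr'] at hr
  · intro h; exact ⟨(q.2, q.1), h, rfl⟩

theorem mem_addTargets (t : PySem.Set String) (l : List Char) (x : String) :
    x ∈ addTargets t l ↔ x ∈ t ∨ ∃ q ∈ abaPairs l, x = String.ofList [q.2, q.1, q.2] := by
  induction t, l using addTargets.induct with
  | case1 t a b c rest ih =>
      rw [addTargets, ih]
      simp only [abaPairs]
      split_ifs with h
      · simp [PySem.Set.mem_add]; tauto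
      · simp
  | case2 l t h => cases l with
      | nil => simp [addTargets, abaPairs]
      | cons a t2 => cases t2 with
        | nil => simp [addTargets, abaPairs]
        | cons b t3 => cases t3 with
          | nil => simp [addTargets, abaPairs]
          | cons c r => exact (h a b c r rfl).elim

theorem mem_collectTargets_aux (ip : List String) (t0 : PySem.Set String) (x : String) :
    x ∈ ip.foldl (fun t part =>
        if PySem.Str.startswith part "[" then addTargets t part.toList else t) t0 ↔
      x ∈ t0 ∨ ∃ q ∈ insP ip, x = String.ofList [q.2, q.1, q.2] := by
  induction ip generalizing t0 with
  | nil => simp [insP]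
  | cons part rest ih =>
      rw [List.foldl_cons]
      by_cases hb : PySem.Str.startswith part "[" = true
      · rw [if_pos hb, ih, mem_addTargets]
        simp only [insP, if_pos hb, List.mem_append, or_and_right, exists_or]
        exact or_assoc
      · rw [if_neg hb, ih]
        simp only [insP, if_neg hb, List.nil_append]

theorem mem_collectTargets (ip : List String) (x : String) :
    x ∈ collectTargets ip ↔ ∃ q ∈ insP ip, x = String.ofList [q.2, q.1, q.2] := by
  rw [collectTargets, mem_collectTargets_aux]
  simp [PySem.Set.empty]

theorem step_eq (count : Int) (ip : List String) :
    (let p := ip.foldl stepPartA (([] : List String), ([] : List String))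
     if p.1.any (hitA p.2) then count + 1 else count)
    = (let targets := collectTargets ip
       if ip.any (fun part =>
           !PySem.Str.startswith part "[" && targets.any (fun t => PySem.Str.isIn t part))
       then count + 1 else count) := by
  simp only [foldA_eq, List.nil_append]
  have key : (((outsP ip).map tri).any (hitA ((insP ip).map tri)))
      = (ip.any (fun part =>
          !PySem.Str.startswith part "[" &&
            (collectTargets ip).any (fun t => PySem.Str.isIn t part))) := by
    rw [Bool.eq_iff_iff]
    simp only [List.any_eq_true, List.mem_map, Bool.and_eq_true, Bool.not_eq_true']
    constructor
    · rintro ⟨s, ⟨q, hq, rfl⟩, hf⟩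
      rw [hitA_tri, decide_eq_true_iff] at hf
      -- q = (a,b) is an outside ABA with (b,a) an inside ABA; part the outside part carrying it
      obtain ⟨part, hpart, hnb, hmem⟩ := (mem_outsP ip q).mp hq
      refine ⟨part, hpart, hnb, String.ofList [q.1, q.2, q.1], ?_, ?_⟩
      · rw [mem_collectTargets]
        exact ⟨(q.2, q.1), hf, rfl⟩
      · rw [PySem.Str.isIn_iff_infix]
        have hne : q.1 ≠ q.2 := mem_abaPairs_ne _ _ hmem
        have := (aba_infix_iff part.toList q.1 q.2 hne).mpr hmem
        simpa using this
    · rintro ⟨part, hpart, hnb, t, ht, hin⟩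
      rw [mem_collectTargets] at ht
      obtain ⟨q, hq, rfl⟩ := ht
      rw [PySem.Str.isIn_iff_infix] at hin
      obtain ⟨p', -, -, hm'⟩ := (mem_insP ip q).mp hq
      have hne : q.1 ≠ q.2 := mem_abaPairs_ne _ _ hm'
      have hin' : [q.2, q.1, q.2] <:+: part.toList := by simpa using hin
      have hout : (q.2, q.1) ∈ abaPairs part.toList :=
        (aba_infix_iff part.toList q.2 q.1 (Ne.symm hne)).mp hin'
      refine ⟨tri (q.2, q.1), ⟨(q.2, q.1), ?_, rfl⟩, ?_⟩
      · exact (mem_outsP ip (q.2, q.1)).mpr ⟨part, hpart, hnb, hout⟩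
      · rw [hitA_tri]
        exact decide_eq_true (by simpa using hq)
  rw [key]

-- ===== VERDICT (by name: the statement is the Claim_ definition above) =====
theorem count_ssl_spec : Claim_equal_count_ssl := by
  intro lst hD
  clear hD
  unfold Spec_count_ssl count_ssl count_ssl_alt
  induction lst using List.reverseRecOn with
  | nil => rfl
  | append_singleton rest ip ih =>
      rw [List.foldl_append, List.foldl_append, ih, List.foldl_cons, List.foldl_cons,
        List.foldl_nil, List.foldl_nil]
      exact step_eq _ ip
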